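-- pv_equiv track=rewrite | github.com/amoglock/codewars_trainings | 4_kyu/permutational_primes.py | permutational_primes
-- ===== SOURCE A (Python) =====
-- def is_prime(number):
--     if number <= 1:
--         return False
--     if number <= 3:
--         return True
--     if number % 2 == 0 or number % 3 == 0:
--         return False
--     i = 5
--     while i * i <= number:
--         if number % i == 0 or number % (i + 2) == 0:
--             return False
--         i += 6
--     return True
--
-- def permutational_primes(n_max, k_perms):
--     prime_numbers = {}
--     result_numbers = {}
--     min_number, max_number, counter = n_max, 0, 0
--     for number in range(n_max):
--         if is_prime(number):
--             sorted_number = "".join(sorted(str(number)))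
--             if sorted_number not in prime_numbers:
--                 prime_numbers[sorted_number] = number
--                 result_numbers[number] = set()
--             else:
--                 result_numbers[prime_numbers[sorted_number]].add(number)
--     for number in result_numbers:
--         if len(result_numbers[number]) == k_perms:
--             min_number = min(min_number, number)
--             max_number = max(max_number, number)
--             counter += 1
--     return [counter, min_number, max_number] if counter else [0, 0, 0]
-- ===== SOURCE B (Python) =====
-- def permutational_primes(n_max, k_perms):
--     limit = n_max - 1
--     if limit < 2:
--         return [0, 0, 0]
--     sieve = [True] * (limit + 1)
--     sieve[0] = sieve[1] = False
--     i = 2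
--     while i * i <= limit:
--         if sieve[i]:
--             for j in range(i * i, limit + 1, i):
--                 sieve[j] = False
--         i += 1
--     groups = {}
--     for p in range(2, limit + 1):
--         if sieve[p]:
--             key = "".join(sorted(str(p)))
--             if key in groups:
--                 leader, count = groups[key]
--                 groups[key] = (leader, count + 1)
--             else:
--                 groups[key] = (p, 0)
--     min_number, max_number, counter = n_max, 0, 0
--     for leader, count in groups.values():
--         if count == k_perms:
--             min_number = min(min_number, leader)
--             max_number = max(max_number, leader)
--             counter += 1
--     return [counter, min_number, max_number] if counter else [0, 0, 0]
-- ===== Notes on version B (the rewrite author's own statement) =====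
-- stated objective: faster
-- what changed: B generates primes with one Sieve of Eratosthenes instead of A's per-number 6k±1 trial division, and fuses A's two dicts plus second grouping pass into a single dict mapping the sorted-digits key to (group leader, count of later permutations).
import Mathlib
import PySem

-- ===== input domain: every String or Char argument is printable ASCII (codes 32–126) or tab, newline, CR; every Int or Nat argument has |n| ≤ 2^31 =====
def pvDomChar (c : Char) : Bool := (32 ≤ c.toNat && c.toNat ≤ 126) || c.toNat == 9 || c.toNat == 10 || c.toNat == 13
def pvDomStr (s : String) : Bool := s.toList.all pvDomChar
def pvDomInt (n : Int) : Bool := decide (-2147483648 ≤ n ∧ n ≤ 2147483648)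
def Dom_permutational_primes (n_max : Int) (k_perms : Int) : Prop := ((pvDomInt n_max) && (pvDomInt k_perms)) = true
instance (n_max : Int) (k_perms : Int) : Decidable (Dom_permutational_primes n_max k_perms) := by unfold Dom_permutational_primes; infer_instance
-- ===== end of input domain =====

-- B replaces A's per-number 6k±1 trial division by one Sieve of Eratosthenes and fuses A's
-- two dicts + second grouping pass into a single dict keyed by sorted digits holding
-- (group leader, count of later permutations); objective: faster.

-- ===== PORT A =====

-- while i * i <= number: if number % i == 0 or number % (i+2) == 0: return False; i += 6
def isPrimeLoop (number : Int) (i : Int) : Bool :=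
  if _h : i * i ≤ number then
    if PySem.Int.mod number i == 0 || PySem.Int.mod number (i + 2) == 0 then false
    else isPrimeLoop number (i + 6)
  else true
termination_by (number + 1 - i).toNat
decreasing_by
  have hi : i ≤ number := by nlinarith [sq_nonneg i, sq_nonneg (i - 1)]
  omega

def is_prime (number : Int) : Bool :=
  if number ≤ 1 then false
  else if number ≤ 3 then true
  else if PySem.Int.mod number 2 == 0 || PySem.Int.mod number 3 == 0 then false
  else isPrimeLoop number 5

-- sorted_number = "".join(sorted(str(number))): kept as the sorted list of digit chars
-- (it is only used as a dict key, and two strings are equal iff their char lists are)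
def sortKey (number : Int) : List Char :=
  PySem.List.sorted (PySem.Int.toChars number) (fun c => c) false

-- the body of A's first loop, prime case
def stepACore (st : PySem.Dict (List Char) Int × PySem.Dict Int (PySem.Set Int)) (number : Int) :
    PySem.Dict (List Char) Int × PySem.Dict Int (PySem.Set Int) :=
  match st.1.get? (sortKey number) with
  | none => (st.1.insert (sortKey number) number, st.2.insert number PySem.Set.empty)
  | some l => (st.1, st.2.modify l PySem.Set.empty (fun s => PySem.Set.add s number))

-- the body of A's first loop
def stepA (st : PySem.Dict (List Char) Int × PySem.Dict Int (PySem.Set Int)) (number : Int) :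
    PySem.Dict (List Char) Int × PySem.Dict Int (PySem.Set Int) :=
  if is_prime number then stepACore st number else st

-- the body of A's second loop; the accumulator is (min_number, max_number, counter)
def stepA2 (k_perms : Int) (rn : PySem.Dict Int (PySem.Set Int)) (acc : Int × Int × Int)
    (number : Int) : Int × Int × Int :=
  if PySem.Set.len (rn.getD number PySem.Set.empty) == k_perms then
    (min acc.1 number, max acc.2.1 number, acc.2.2 + 1)
  else acc

def permutational_primes (n_max : Int) (k_perms : Int) : List Int :=
  let st := (PySem.List.pyRange 0 n_max 1).foldl stepA (PySem.Dict.empty, PySem.Dict.empty)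
  let fin := st.2.keys.foldl (stepA2 k_perms st.2) (n_max, 0, 0)
  if fin.2.2 ≠ 0 then [fin.2.2, fin.1, fin.2.1] else [0, 0, 0]

-- ===== PORT B =====

-- for j in range(i*i, limit+1, i): sieve[j] = False   (j is provably nonnegative and in range)
def sieveInner (limit : Int) (i : Int) (sieve : List Bool) : List Bool :=
  (PySem.List.pyRange (i * i) (limit + 1) i).foldl (fun s j => s.set j.toNat false) sieve

-- while i * i <= limit: if sieve[i]: mark multiples; i += 1
def sieveLoop (limit : Int) (sieve : List Bool) (i : Int) : List Bool :=
  if _h : i * i ≤ limit then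
    sieveLoop limit (if sieve.getD i.toNat false then sieveInner limit i sieve else sieve) (i + 1)
  else sieve
termination_by (limit + 1 - i).toNat
decreasing_by
  have hi : i ≤ limit := by nlinarith [sq_nonneg i, sq_nonneg (i - 1)]
  omega

-- the body of B's grouping loop, prime case: groups[key] = (leader, count)
def stepBCore (g : PySem.Dict (List Char) (Int × Int)) (p : Int) :
    PySem.Dict (List Char) (Int × Int) :=
  match g.get? (sortKey p) with
  | some lc => g.insert (sortKey p) (lc.1, lc.2 + 1)
  | none => g.insert (sortKey p) (p, 0)

-- the body of B's grouping loop
def stepB (sieve : List Bool) (g : PySem.Dict (List Char) (Int × Int)) (p : Int) :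
    PySem.Dict (List Char) (Int × Int) :=
  if sieve.getD p.toNat false then stepBCore g p else g

-- the body of B's final loop over groups.values()
def stepB2 (k_perms : Int) (acc : Int × Int × Int) (lc : Int × Int) : Int × Int × Int :=
  if lc.2 == k_perms then (min acc.1 lc.1, max acc.2.1 lc.1, acc.2.2 + 1) else acc

def permutational_primes_alt (n_max : Int) (k_perms : Int) : List Int :=
  let limit := n_max - 1
  if limit < 2 then [0, 0, 0]
  else
    let sieve0 := ((List.replicate (limit + 1).toNat true).set 0 false).set 1 false
    let sieve := sieveLoop limit sieve0 2
    let g := (PySem.List.pyRange 2 (limit + 1) 1).foldl (stepB sieve) PySem.Dict.empty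
    let fin := g.values.foldl (stepB2 k_perms) (n_max, 0, 0)
    if fin.2.2 ≠ 0 then [fin.2.2, fin.1, fin.2.1] else [0, 0, 0]

-- ===== PRECONDITION & SPEC =====
def Spec_permutational_primes (n_max : Int) (k_perms : Int) (out : List Int) : Prop := out = permutational_primes_alt n_max k_perms
instance (n_max : Int) (k_perms : Int) (out : List Int) : Decidable (Spec_permutational_primes n_max k_perms out) := by unfold Spec_permutational_primes; infer_instance

-- ===== CLAIM (what is proved, stated in full; the proofs are below) =====
def Claim_equal_permutational_primes : Prop := ∀ (n_max : Int) (k_perms : Int), Dom_permutational_primes n_max k_perms → Spec_permutational_primes n_max k_perms (permutational_primes n_max k_perms)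

-- ===== LEMMAS AND PROOFS =====

def NoSmallDiv (n : Int) : Prop := 2 ≤ n ∧ ∀ d : Int, 2 ≤ d → d * d ≤ n → ¬ d ∣ n

lemma loop_no_div : ∀ (n i : Int), 0 < i → i % 6 = 5 → isPrimeLoop n i = true →
    ∀ d : Int, d ∣ n → d * d ≤ n →
    ((d % 6 = 5 ∧ i ≤ d) ∨ (d % 6 = 1 ∧ i ≤ d - 2)) → False := by
  intro n i
  induction i using isPrimeLoop.induct n with
  | case1 i hle hcond =>
    intro hi hm hloop
    rw [isPrimeLoop, dif_pos hle, if_pos hcond] at hloop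
    exact absurd hloop (by simp)
  | case2 i hle hcond ih =>
    intro hi hm hloop d hdvd hdd hcase
    rw [isPrimeLoop, dif_pos hle, if_neg hcond] at hloop
    simp only [Bool.or_eq_true, beq_iff_eq, not_or, PySem.Int.mod_eq_zero_iff_dvd] at hcond
    have hdi : d ≠ i := fun h => hcond.1 (h ▸ hdvd)
    have hdi2 : d ≠ i + 2 := fun h => hcond.2 (h ▸ hdvd)
    refine ih (by omega) (by omega) hloop d hdvd hdd ?_
    rcases hcase with ⟨h1, h2⟩ | ⟨h1, h2⟩
    · left; omega
    · right; omega
  | case3 i hnle =>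
    intro hi hm hloop d hdvd hdd hcase
    have hid : i ≤ d := by rcases hcase with ⟨_, h⟩ | ⟨_, h⟩ <;> omega
    nlinarith

lemma loop_false_div : ∀ (n i : Int), 5 ≤ i → isPrimeLoop n i = false →
    ∃ d : Int, 2 ≤ d ∧ d ∣ n ∧ d * d ≤ n := by
  intro n i
  induction i using isPrimeLoop.induct n with
  | case1 i hle hcond =>
    intro hi _
    simp only [Bool.or_eq_true, beq_iff_eq, PySem.Int.mod_eq_zero_iff_dvd] at hcond
    rcases hcond with h | h
    · exact ⟨i, by omega, h, hle⟩
    · obtain ⟨c, hc⟩ := h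
      have hn : i * i ≤ n := hle
      have hc1 : 1 ≤ c := by nlinarith
      by_cases hbig : (i + 2) * (i + 2) ≤ n
      · exact ⟨i + 2, by omega, ⟨c, hc⟩, hbig⟩
      · have hci : c < i + 2 := by nlinarith
        have hc2 : 2 ≤ c := by nlinarith
        exact ⟨c, hc2, ⟨i + 2, by linarith [hc, mul_comm (i+2) c]⟩, by nlinarith⟩
  | case2 i hle hcond ih =>
    intro hi hloop
    rw [isPrimeLoop, dif_pos hle, if_neg hcond] at hloop
    exact ih (by omega) hloop
  | case3 i hnle =>
    intro hi hloop
    rw [isPrimeLoop, dif_neg hnle] at hloop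
    exact absurd hloop (by simp)

lemma is_prime_iff (p : Int) : is_prime p = true ↔ NoSmallDiv p := by
  unfold is_prime NoSmallDiv
  split_ifs with h1 h2 h3
  · simp only [false_iff]; rintro ⟨h, -⟩; omega
  · simp only [true_iff]
    exact ⟨by omega, fun d hd hdd hdvd => by nlinarith⟩
  · simp only [Bool.or_eq_true, beq_iff_eq, PySem.Int.mod_eq_zero_iff_dvd] at h3
    simp only [false_iff, not_and, not_forall]
    intro _
    rcases h3 with h | h
    · exact ⟨2, by norm_num, by omega, by simpa using h⟩
    · by_cases h2d : (2 : Int) ∣ p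
      · exact ⟨2, by norm_num, by omega, by simpa using h2d⟩
      · refine ⟨3, by norm_num, by omega, by simpa using h⟩
  · simp only [Bool.or_eq_true, beq_iff_eq, PySem.Int.mod_eq_zero_iff_dvd, not_or] at h3
    constructor
    · intro hloop
      refine ⟨by omega, fun d hd hdd hdvd => ?_⟩
      have h2d : ¬ (2 : Int) ∣ d := fun h => h3.1 (h.trans hdvd)
      have h3d : ¬ (3 : Int) ∣ d := fun h => h3.2 (h.trans hdvd)
      have hd5 : 5 ≤ d := by omega
      have hmod : d % 6 = 1 ∨ d % 6 = 5 := by omega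
      apply loop_no_div p 5 (by norm_num) (by norm_num) hloop d hdvd hdd
      rcases hmod with h | h
      · right; exact ⟨h, by omega⟩
      · left; exact ⟨h, by omega⟩
    · rintro ⟨-, hns⟩
      by_contra hfalse
      obtain ⟨d, hd, hdvd, hdd⟩ := loop_false_div p 5 (le_refl 5) (by simpa using hfalse)
      exact hns d hd hdd hdvd

def GoodAt (i : Int) (m : Nat) : Prop :=
  2 ≤ m ∧ ∀ d : Int, 2 ≤ d → d < i → d ∣ (m : Int) → ¬ d * d ≤ (m : Int)

lemma getD_foldl_set_false : ∀ (js : List Int) (s : List Bool) (m : Nat), (∀ j ∈ js, 0 ≤ j) →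
    (js.foldl (fun s j => s.set j.toNat false) s).getD m false
      = if (m : Int) ∈ js then false else s.getD m false := by
  intro js
  induction js with
  | nil => simp
  | cons j js ih =>
    intro s m hpos
    simp only [List.foldl_cons]
    rw [ih _ m (fun x hx => hpos x (by simp [hx]))]
    by_cases hmj : (m : Int) = j
    · have hj : j.toNat = m := by omega
      rw [if_pos (show (m : Int) ∈ j :: js by simp [hmj])]
      by_cases hmem : (m : Int) ∈ js
      · rw [if_pos hmem]
      · rw [if_neg hmem, List.getD_eq_getElem?_getD, List.getElem?_set, hj, if_pos rfl]
        split_ifs <;> rfl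
    · have hj : j.toNat ≠ m := by have := hpos j (by simp); omega
      simp only [List.mem_cons, hmj, false_or]
      rw [List.getD_eq_getElem?_getD, List.getElem?_set, if_neg hj,
        ← List.getD_eq_getElem?_getD]

lemma sieveInner_getD (limit i : Int) (s : List Bool) (hi : 2 ≤ i) (m : Nat) (hm : (m : Int) ≤ limit) :
    (sieveInner limit i s).getD m false
      = if i ∣ (m : Int) ∧ i * i ≤ (m : Int) then false else s.getD m false := by
  unfold sieveInner
  rw [getD_foldl_set_false _ _ _
    (fun j hj => by
      have := (PySem.List.mem_pyRange_iff_of_pos (by omega) j).1 hj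
      nlinarith [this.1])]
  have hiff : (m : Int) ∈ PySem.List.pyRange (i * i) (limit + 1) i ↔ i ∣ (m : Int) ∧ i * i ≤ (m : Int) := by
    rw [PySem.List.mem_pyRange_iff_of_pos (by omega)]
    have hsub : i ∣ (m : Int) - i * i ↔ i ∣ (m : Int) := by
      constructor
      · intro h; simpa using dvd_add h (dvd_mul_right i i)
      · intro h; exact dvd_sub h (dvd_mul_right i i)
    constructor
    · rintro ⟨h1, _, h3⟩; exact ⟨hsub.1 h3, h1⟩
    · rintro ⟨h1, h2⟩; exact ⟨h2, by omega, hsub.2 h1⟩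
  rw [if_congr hiff rfl rfl]

lemma sieveLoop_getD : ∀ (limit : Int) (s : List Bool) (i : Int), 2 ≤ i →
    (∀ m : Nat, (m : Int) ≤ limit → (s.getD m false = true ↔ GoodAt i m)) →
    ∀ m : Nat, (m : Int) ≤ limit →
    ((sieveLoop limit s i).getD m false = true ↔ NoSmallDiv (m : Int)) := by
  intro limit s i
  induction s, i using sieveLoop.induct limit with
  | case1 s i hle ih =>
    intro hi hinv m hm
    rw [sieveLoop, dif_pos hle]
    apply ih (by omega) ?_ m hm
    intro m hm
    by_cases hs : s.getD i.toNat false = true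
    · rw [dif_pos hs, sieveInner_getD limit i s hi m hm]
      by_cases hc : i ∣ (m : Int) ∧ i * i ≤ (m : Int)
      · rw [if_pos hc]
        simp only [Bool.false_eq_true, false_iff]
        rintro ⟨h2, hall⟩
        exact hall i (by omega) (by omega) hc.1 hc.2
      · rw [if_neg hc, hinv m hm]
        constructor
        · rintro ⟨h2, hall⟩
          refine ⟨h2, fun d hd hdlt hdvd hdd => ?_⟩
          by_cases hdi : d = i
          · exact hc ⟨hdi ▸ hdvd, hdi ▸ hdd⟩
          · exact hall d hd (by omega) hdvd hdd
        · rintro ⟨h2, hall⟩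
          exact ⟨h2, fun d hd hdlt => hall d hd (by omega)⟩
    · rw [dif_neg hs]
      have hii : i ≤ limit := by nlinarith
      have hit : ((i.toNat : Nat) : Int) = i := by omega
      have hng : ¬ GoodAt i i.toNat := fun hg => hs ((hinv i.toNat (by omega)).2 hg)
      unfold GoodAt at hng
      push Not at hng
      obtain ⟨e, he2, helt, hedvd, hee⟩ := hng (by omega)
      rw [hit] at hedvd hee
      rw [hinv m hm]
      constructor
      · rintro ⟨h2, hall⟩
        refine ⟨h2, fun d hd hdlt hdvd hdd => ?_⟩
        by_cases hdi : d = i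
        · subst hdi
          refine hall e he2 helt (hedvd.trans hdvd) ?_
          nlinarith
        · exact hall d hd (by omega) hdvd hdd
      · rintro ⟨h2, hall⟩
        exact ⟨h2, fun d hd hdlt => hall d hd (by omega)⟩
  | case2 s i hnle =>
    intro hi hinv m hm
    rw [sieveLoop, dif_neg hnle, hinv m hm]
    unfold GoodAt NoSmallDiv
    constructor
    · rintro ⟨h2, hall⟩
      refine ⟨by omega, fun d hd hdd hdvd => ?_⟩
      have hdlt : d < i := by nlinarith
      exact hall d hd hdlt hdvd hdd
    · rintro ⟨h2, hall⟩
      exact ⟨by omega, fun d hd hdlt hdvd hdd => hall d hd hdd hdvd⟩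

lemma sieve_eq_is_prime (n_max : Int) (h3 : 3 ≤ n_max) (p : Int) (hp : 2 ≤ p) (hp2 : p ≤ n_max - 1) :
    (sieveLoop (n_max - 1) (((List.replicate ((n_max - 1) + 1).toNat true).set 0 false).set 1 false) 2).getD p.toNat false
      = is_prime p := by
  have hinv0 : ∀ m : Nat, (m : Int) ≤ n_max - 1 →
      ((((List.replicate ((n_max - 1) + 1).toNat true).set 0 false).set 1 false).getD m false = true
        ↔ GoodAt 2 m) := by
    intro m hm
    have hlen : m < ((n_max - 1) + 1).toNat := by omega
    unfold GoodAt
    rw [List.getD_eq_getElem?_getD, List.getElem?_set, List.getElem?_set, List.getElem?_replicate]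
    rcases Nat.lt_or_ge m 2 with h | h
    · interval_cases m <;>
        simp [show (0:Int) < n_max by omega, show (1:Int) < n_max by omega]
    · have h0 : (1 : Nat) ≠ m := by omega
      have h1 : (0 : Nat) ≠ m := by omega
      simp only [h0, h1, if_false, List.length_set, List.length_replicate, hlen, if_true]
      simp only [Option.getD_some, true_iff]
      exact ⟨by omega, fun d hd hdlt hdvd hdd => by omega⟩
  have := sieveLoop_getD (n_max - 1) _ 2 (le_refl 2) hinv0 p.toNat (by omega)
  have hcast : ((p.toNat : Nat) : Int) = p := by omega
  rw [hcast] at this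
  rw [Bool.eq_iff_iff, this, is_prime_iff]

def PPRel (a : Int × PySem.Set Int) (e : List Char × (Int × Int)) : Prop :=
  a.1 = e.2.1 ∧ (a.2.length : Int) = e.2.2 ∧ a.2.Nodup

def mkpn (g : PySem.Dict (List Char) (Int × Int)) : PySem.Dict (List Char) Int :=
  PySem.Dict.mk (g.items.map (fun e => (e.1, e.2.1)))

def PPInv (st : PySem.Dict (List Char) Int × PySem.Dict Int (PySem.Set Int))
    (g : PySem.Dict (List Char) (Int × Int)) : Prop :=
  st.1 = mkpn g ∧ List.Forall₂ PPRel st.2.items g.items ∧ g.keys.Nodup ∧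
    (g.items.map (fun e => e.2.1)).Nodup

lemma forall₂_append_single {α β} {R : α → β → Prop} {as bs a b} (h : List.Forall₂ R as bs)
    (h2 : R a b) : List.Forall₂ R (as ++ [a]) (bs ++ [b]) := by
  induction h with
  | nil => simpa using List.Forall₂.cons h2 List.Forall₂.nil
  | cons hR _ ih => exact List.Forall₂.cons hR ih

lemma forall₂_map_mem {α β γ δ} {R : α → β → Prop} {R' : γ → δ → Prop} {as bs}
    (h : List.Forall₂ R as bs) (f : α → γ) (g : β → δ)
    (hfg : ∀ a b, a ∈ as → b ∈ bs → R a b → R' (f a) (g b)) :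
    List.Forall₂ R' (as.map f) (bs.map g) := by
  induction h with
  | nil => exact List.Forall₂.nil
  | cons hR h ih =>
    exact List.Forall₂.cons (hfg _ _ (by simp) (by simp) hR)
      (ih (fun a b ha hb => hfg a b (by simp [ha]) (by simp [hb])))

lemma foldl_forall₂ {α β γ} {R : α → β → Prop} {as bs} (h : List.Forall₂ R as bs)
    (f : γ → α → γ) (g : γ → β → γ)
    (hstep : ∀ acc a b, a ∈ as → b ∈ bs → R a b → f acc a = g acc b) :
    ∀ acc, as.foldl f acc = bs.foldl g acc := by
  induction h with
  | nil => intro acc; rfl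
  | cons hR _ ih =>
    intro acc
    simp only [List.foldl_cons, hstep _ _ _ (by simp) (by simp) hR]
    exact ih (fun acc a b ha hb hr => hstep acc a b (by simp [ha]) (by simp [hb]) hr) _

lemma forall₂_fst {as : List (Int × PySem.Set Int)} {bs} (h : List.Forall₂ PPRel as bs) :
    as.map Prod.fst = bs.map (fun e => e.2.1) := by
  induction h with
  | nil => rfl
  | cons hR _ ih => simp [ih, hR.1]

lemma get?_mkpn (g : PySem.Dict (List Char) (Int × Int)) (k : List Char) :
    (mkpn g).get? k = (g.get? k).map (fun lc => lc.1) := by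
  obtain ⟨items⟩ := g
  induction items with
  | nil => rfl
  | cons e rest ih =>
    show (PySem.Dict.mk ((e.1, e.2.1) :: rest.map _)).get? k = _
    rw [PySem.Dict.get?_mk_cons, PySem.Dict.get?_mk_cons]
    by_cases h : e.1 == k
    · simp [h]
    · simp only [h, Bool.false_eq_true, if_false]
      exact ih

lemma grouping : ∀ (P : List Int) (g : PySem.Dict (List Char) (Int × Int))
    (st : PySem.Dict (List Char) Int × PySem.Dict Int (PySem.Set Int)),
    PPInv st g →
    (∀ p ∈ P, ∀ e ∈ st.2.items, e.1 < p ∧ ∀ y ∈ e.2, y < p) →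
    P.Pairwise (· < ·) →
    PPInv (P.foldl stepACore st) (P.foldl stepBCore g) := by
  intro P
  induction P with
  | nil => intro g st h _ _; exact h
  | cons p P ih =>
    rintro g ⟨pn, rn⟩ ⟨hpn, hf2, hknd, hlnd⟩ hbd hpw
    dsimp only at hpn hf2 hbd
    simp only [List.foldl_cons]
    have hbdp := hbd p (by simp)
    have hptail : ∀ q ∈ P, p < q := (List.pairwise_cons.1 hpw).1
    have hpwt : P.Pairwise (· < ·) := (List.pairwise_cons.1 hpw).2
    have hgknd : (g.items.map Prod.fst).Nodup := hknd
    have hrnk : rn.keys = g.items.map (fun e => e.2.1) := forall₂_fst hf2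
    have hrnd : rn.keys.Nodup := by rw [hrnk]; exact hlnd
    cases hg : g.get? (sortKey p) with
    | none =>
      have hA : pn.get? (sortKey p) = none := by
        rw [hpn, get?_mkpn, hg]; rfl
      have hgc : g.contains (sortKey p) = false := by
        rw [PySem.Dict.contains_eq_isSome_get?, hg]; rfl
      have hpnc : pn.contains (sortKey p) = false := by
        rw [PySem.Dict.contains_eq_isSome_get?, hA]; rfl
      have hpk : p ∉ rn.keys := by
        rw [hrnk, ← forall₂_fst hf2]
        intro hmem
        obtain ⟨e, he, hfst⟩ := List.mem_map.1 hmem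
        exact absurd ((hbdp e he).1) (by rw [hfst]; omega)
      have hrc : rn.contains p = false := by
        rw [← Bool.not_eq_true, PySem.Dict.contains_iff_mem_keys]; exact hpk
      have hstep : stepACore (pn, rn) p
          = (pn.insert (sortKey p) p, rn.insert p PySem.Set.empty) := by
        unfold stepACore; rw [hA]
      have hstepB : stepBCore g p = g.insert (sortKey p) (p, 0) := by
        unfold stepBCore; rw [hg]
      rw [hstep, hstepB]
      have hgi : (g.insert (sortKey p) (p, 0)).items = g.items ++ [(sortKey p, (p, 0))] :=
        PySem.Dict.items_insert_of_not_contains g _ hgc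
      apply ih
      · refine ⟨?_, ?_, ?_, ?_⟩
        · apply PySem.Dict.ext
          rw [PySem.Dict.items_insert_of_not_contains pn _ hpnc, hpn]
          show (mkpn g).items ++ _ = (mkpn _).items
          simp only [mkpn, hgi, List.map_append, List.map_cons, List.map_nil]
        · show List.Forall₂ PPRel (rn.insert p PySem.Set.empty).items _
          rw [PySem.Dict.items_insert_of_not_contains rn _ hrc, hgi]
          exact forall₂_append_single hf2 ⟨rfl, by simp [PySem.Set.empty], by simp [PySem.Set.empty]⟩
        · show ((g.insert (sortKey p) (p, 0)).items.map Prod.fst).Nodup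
          rw [hgi]
          simp only [List.map_append, List.map_cons, List.map_nil]
          rw [List.nodup_append]
          refine ⟨hgknd, by simp, ?_⟩
          intro x hx b hb
          simp only [List.mem_singleton] at hb
          subst hb
          intro hxb
          subst hxb
          exact (PySem.Dict.get?_eq_none_iff_not_mem_keys g _).1 hg hx
        · rw [hgi]
          simp only [List.map_append, List.map_cons, List.map_nil]
          rw [List.nodup_append]
          refine ⟨hlnd, by simp, ?_⟩
          intro x hx b hb
          simp only [List.mem_singleton] at hb
          subst hb
          rw [← hrnk] at hx
          obtain ⟨e, he, hfst⟩ := List.mem_map.1 hx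
          have := (hbdp e he).1
          omega
      · intro q hq e he
        rw [PySem.Dict.items_insert_of_not_contains rn _ hrc] at he
        rcases List.mem_append.1 he with he | he
        · exact hbd q (by simp [hq]) e he
        · simp only [List.mem_singleton] at he
          subst he
          exact ⟨hptail q hq, by simp [PySem.Set.empty]⟩
      · exact hpwt
    | some lc =>
      obtain ⟨l, c⟩ := lc
      have hA : pn.get? (sortKey p) = some l := by
        rw [hpn, get?_mkpn, hg]; rfl
      have hgc : g.contains (sortKey p) = true := by
        rw [PySem.Dict.contains_eq_isSome_get?, hg]; rfl
      have hmem : (sortKey p, (l, c)) ∈ g.items := PySem.Dict.mem_items_of_get?_eq_some g hg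
      have hlmem : l ∈ rn.keys := by
        rw [hrnk]
        exact List.mem_map.2 ⟨(sortKey p, (l, c)), hmem, rfl⟩
      have hrc : rn.contains l = true := (PySem.Dict.contains_iff_mem_keys rn l).2 hlmem
      have hstep : stepACore (pn, rn) p
          = (pn, rn.insert l (PySem.Set.add (rn.getD l PySem.Set.empty) p)) := by
        unfold stepACore; rw [hA]; rfl
      have hstepB : stepBCore g p = g.insert (sortKey p) (l, c + 1) := by
        unfold stepBCore; rw [hg]
      rw [hstep, hstepB]
      have hgi := PySem.Dict.items_insert_of_contains g (l, c + 1) hgc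
      have hri := PySem.Dict.items_insert_of_contains rn
        (PySem.Set.add (rn.getD l PySem.Set.empty) p) hrc
      -- every g-item whose key is sortKey p is THE item (sortKey p, (l, c))
      have hkey_uniq : ∀ e ∈ g.items, e.1 = sortKey p → e = (sortKey p, (l, c)) :=
        fun e he hk => List.inj_on_of_nodup_map hgknd he hmem (by simpa using hk)
      -- every g-item whose leader is l is THE item (sortKey p, (l, c))
      have hlead_uniq : ∀ e ∈ g.items, e.2.1 = l → e = (sortKey p, (l, c)) :=
        fun e he hk => List.inj_on_of_nodup_map hlnd he hmem (by simpa using hk)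
      have hmap_keys : ∀ e ∈ g.items,
          (if e.1 == sortKey p then (sortKey p, (l, c + 1)) else e).1 = e.1 := by
        intro e he
        by_cases h : e.1 = sortKey p <;> simp [h]
      have hmap_lead : ∀ e ∈ g.items,
          (if e.1 == sortKey p then (sortKey p, (l, c + 1)) else e).2.1 = e.2.1 := by
        intro e he
        by_cases h : e.1 = sortKey p
        · have := hkey_uniq e he h
          subst this
          simp
        · simp [h]
      apply ih
      · refine ⟨?_, ?_, ?_, ?_⟩
        · rw [hpn]
          apply PySem.Dict.ext
          show (mkpn g).items = _
          simp only [mkpn, hgi, List.map_map]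
          apply List.map_congr_left
          intro e he
          simp only [Function.comp_apply]
          by_cases h : e.1 = sortKey p
          · have := hkey_uniq e he h
            subst this
            simp
          · simp [h]
        · show List.Forall₂ PPRel (rn.insert l _).items _
          rw [hri, hgi]
          apply forall₂_map_mem hf2
          intro a e ha he hR
          obtain ⟨hR1, hR2, hR3⟩ := hR
          by_cases hek : e.1 = sortKey p
          · have he' := hkey_uniq e he hek
            subst he'
            have hal : a.1 = l := hR1
            have hmem_a : (l, a.2) ∈ rn.items := by rw [← hal]; exact ha
            have hgetd : rn.getD l PySem.Set.empty = a.2 :=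
              PySem.Dict.getD_of_mem_items rn hmem_a hrnd _
            have hnp : p ∉ a.2 := by
              intro hp
              have := (hbd p (by simp) (l, a.2) hmem_a).2 p hp
              omega
            rw [if_pos (by simp [hal]), if_pos (by simp)]
            refine ⟨rfl, ?_, ?_⟩
            · rw [hgetd, PySem.Set.add_of_not_mem hnp]
              simp only [List.length_append, List.length_cons, List.length_nil]
              push_cast
              simp at hR2 ⊢
              omega
            · rw [hgetd, PySem.Set.add_of_not_mem hnp]
              simp only [List.nodup_append]
              refine ⟨hR3, by simp, ?_⟩
              show ∀ y ∈ a.2, ∀ b ∈ [p], y ≠ b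
              intro y hy b hb
              simp only [List.mem_singleton] at hb
              subst hb
              intro h
              exact hnp (h ▸ hy)
          · have hal : a.1 ≠ l := by
              intro h
              have : e.2.1 = l := by rw [← hR1, h]
              exact hek (congrArg Prod.fst (hlead_uniq e he this))
            rw [if_neg (by simpa using hal), if_neg (by simpa using hek)]
            exact ⟨hR1, hR2, hR3⟩
        · show ((g.insert (sortKey p) (l, c + 1)).items.map Prod.fst).Nodup
          rw [hgi, List.map_map]
          rw [List.map_congr_left (fun e he => by simpa using hmap_keys e he)]
          exact hgknd
        · rw [hgi, List.map_map]
          rw [List.map_congr_left (fun e he => by simpa using hmap_lead e he)]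
          exact hlnd
      · intro q hq e he
        rw [hri] at he
        obtain ⟨a, ha, hae⟩ := List.mem_map.1 he
        by_cases hal : a.1 = l
        · have hmem_a : (l, a.2) ∈ rn.items := by rw [← hal]; exact ha
          have hgetd : rn.getD l PySem.Set.empty = a.2 :=
            PySem.Dict.getD_of_mem_items rn hmem_a hrnd _
          rw [if_pos (by simp [hal])] at hae
          subst hae
          refine ⟨?_, ?_⟩
          · have := (hbd q (by simp [hq]) (l, a.2) hmem_a).1
            exact this
          · intro y hy
            rw [hgetd] at hy
            rcases (PySem.Set.mem_add _ _ _).1 hy with hy | hy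
            · exact ((hbd q (by simp [hq]) (l, a.2) hmem_a).2 y hy)
            · subst hy; exact hptail q hq
        · rw [if_neg (by simpa using hal)] at hae
          subst hae
          exact hbd q (by simp [hq]) a ha
      · exact hpwt

-- ===== VERDICT (by name: the statement is the Claim_ definition above) =====
theorem permutational_primes_spec : Claim_equal_permutational_primes := by
  intro n_max k_perms _
  unfold Spec_permutational_primes permutational_primes permutational_primes_alt
  dsimp only
  by_cases hsmall : n_max - 1 < 2
  · rw [if_pos hsmall]
    have hfilter : (PySem.List.pyRange 0 n_max 1).filter is_prime = [] := by
      rw [List.filter_eq_nil_iff]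
      intro x hx
      rw [PySem.List.mem_pyRange_one] at hx
      unfold is_prime
      rw [if_pos (by omega)]
      simp
    have hfold : (PySem.List.pyRange 0 n_max 1).foldl stepA (PySem.Dict.empty, PySem.Dict.empty)
        = (PySem.Dict.empty, PySem.Dict.empty) := by
      show List.foldl (fun acc x => if is_prime x = true then stepACore acc x else acc) _ _ = _
      rw [PySem.List.foldl_if_eq_foldl_filter is_prime stepACore, hfilter]
      rfl
    rw [hfold]
    norm_num
  · rw [if_neg hsmall]
    have h3 : 3 ≤ n_max := by omega
    -- phase 1 on both sides reduces to a fold over the same list of primes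
    have hA1 : (PySem.List.pyRange 0 n_max 1).foldl stepA (PySem.Dict.empty, PySem.Dict.empty)
        = ((PySem.List.pyRange 2 n_max 1).filter is_prime).foldl stepACore
            (PySem.Dict.empty, PySem.Dict.empty) := by
      show List.foldl (fun acc x => if is_prime x = true then stepACore acc x else acc) _ _ = _
      rw [PySem.List.foldl_if_eq_foldl_filter is_prime stepACore,
        PySem.List.pyRange_one_append 0 2 n_max (by norm_num) (by omega), List.filter_append]
      have h01 : (PySem.List.pyRange 0 2 1).filter is_prime = [] := by decide
      rw [h01, List.nil_append]
    have hB1 : ∀ sieve : List Bool,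
        (PySem.List.pyRange 2 ((n_max - 1) + 1) 1).foldl (stepB sieve) PySem.Dict.empty
        = ((PySem.List.pyRange 2 ((n_max - 1) + 1) 1).filter
            (fun p => sieve.getD p.toNat false)).foldl stepBCore PySem.Dict.empty := by
      intro sieve
      exact PySem.List.foldl_if_eq_foldl_filter _ stepBCore _ _
    have hfeq : (PySem.List.pyRange 2 ((n_max - 1) + 1) 1).filter
        (fun p => (sieveLoop (n_max - 1) (((List.replicate ((n_max - 1) + 1).toNat true).set 0
          false).set 1 false) 2).getD p.toNat false)
        = (PySem.List.pyRange 2 n_max 1).filter is_prime := by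
      have hrange : PySem.List.pyRange 2 ((n_max - 1) + 1) 1 = PySem.List.pyRange 2 n_max 1 := by
        norm_num
      refine Eq.trans (List.filter_congr ?_) (by rw [hrange])
      intro x hx
      rw [PySem.List.mem_pyRange_one] at hx
      exact sieve_eq_is_prime n_max h3 x hx.1 (by omega)
    -- run the simulation
    have hinv := grouping ((PySem.List.pyRange 2 n_max 1).filter is_prime)
      PySem.Dict.empty (PySem.Dict.empty, PySem.Dict.empty)
      ⟨rfl, List.Forall₂.nil, by simp [PySem.Dict.keys, PySem.Dict.empty], by simp [PySem.Dict.empty]⟩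
      (by intro p _ e he; simp [PySem.Dict.empty] at he)
      (List.Pairwise.sublist List.filter_sublist (PySem.List.pairwise_lt_pyRange_one 2 n_max))
    obtain ⟨-, hf2, -, hlnd⟩ := hinv
    set stA := ((PySem.List.pyRange 2 n_max 1).filter is_prime).foldl stepACore
      (PySem.Dict.empty, PySem.Dict.empty) with hstA
    set gB := ((PySem.List.pyRange 2 n_max 1).filter is_prime).foldl stepBCore
      PySem.Dict.empty with hgB
    -- phase 2: both folds visit corresponding items
    have hrnd : stA.2.keys.Nodup := by
      show (stA.2.items.map Prod.fst).Nodup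
      rw [forall₂_fst hf2]
      exact hlnd
    have hfin : ∀ acc, stA.2.keys.foldl (stepA2 k_perms stA.2) acc
        = gB.values.foldl (stepB2 k_perms) acc := by
      intro acc
      have hkeys : stA.2.keys.foldl (stepA2 k_perms stA.2) acc
          = stA.2.items.foldl (fun acc e => stepA2 k_perms stA.2 acc e.1) acc := by
        rw [PySem.Dict.items_eq_map_keys stA.2 hrnd PySem.Set.empty, List.foldl_map]
      have hvals : gB.values.foldl (stepB2 k_perms) acc
          = gB.items.foldl (fun acc e => stepB2 k_perms acc e.2) acc := by
        show (gB.items.map (fun e => e.2)).foldl (stepB2 k_perms) acc = _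
        rw [List.foldl_map]
      rw [hkeys, hvals]
      apply foldl_forall₂ hf2
      intro acc a e ha he hR
      obtain ⟨hR1, hR2, hR3⟩ := hR
      have hmem_a : (a.1, a.2) ∈ stA.2.items := ha
      have hgetd : stA.2.getD a.1 PySem.Set.empty = a.2 :=
        PySem.Dict.getD_of_mem_items stA.2 hmem_a hrnd _
      unfold stepA2 stepB2
      rw [hgetd]
      have hlen : PySem.Set.len a.2 = e.2.2 := hR2
      rw [hlen, hR1]
    rw [hA1, hB1, hfeq, hfin, hgB]
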